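-- pv_equiv track=rewrite | github.com/Yoiber22/proyecto_bd | funciones.py | validar_telefono
-- ===== SOURCE A (Python) =====
-- def validar_telefono(numero):
--     numero = numero.replace(' ','').replace('-','')
--     prefijos_celuares = ('093','094','095',       # Movistar
--                          '091','092','098','099', # Antel
--                          '096','097'              # Claro
--                             )
--     prefijos_fijos = ('2',   # Montevideo
--                       '463', # Tacuarembo
--                       '436', # Durazno
--                       '444', # Lavalleja
--                       '435', # Florida
--                       '4364','4385', # Flores
--                       '434', # San Jose
--                       '452', # Colonia
--                       '453', # Soriano
--                       '4567','4560','456',# Rio Negro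
--                       '472', # Paisandu
--                       '473', # Salto
--                       '477', # Aritgas
--                       '462', # Rivera
--                       '464', # Cerro Largo
--                       '445', # Treinta y Tres
--                       '447', # Rocha
--                       '442', # Maldonado
--                       '433'  # Canelores
--                     )
--     if len(numero) == 9:
--         for prefijo in prefijos_celuares:
--             if numero.startswith(prefijo):
--                 return True, numero
--
--     elif len(numero) == 8:
--         for prefijo in prefijos_fijos:
--             if numero.startswith(prefijo):
--                 return True, numero
--     return False, None
-- ===== SOURCE B (Python) =====
-- # One flat table: prefix -> required total length. The number is scanned by its own
-- # prefixes (k = 1..4) instead of scanning the prefix lists; no per-length branching.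
-- _PREF_REQ = {
--     '093': 9, '094': 9, '095': 9,            # Movistar
--     '091': 9, '092': 9, '098': 9, '099': 9,  # Antel
--     '096': 9, '097': 9,                      # Claro
--     '2': 8, '463': 8, '436': 8, '444': 8, '435': 8,
--     '4364': 8, '4385': 8, '434': 8, '452': 8, '453': 8,
--     '4567': 8, '4560': 8, '456': 8, '472': 8, '473': 8,
--     '477': 8, '462': 8, '464': 8, '445': 8, '447': 8,
--     '442': 8, '433': 8,
-- }
--
--
-- def validar_telefono(numero):
--     numero = ''.join(c for c in numero if c not in ' -')
--     n = len(numero)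
--     for k in range(1, min(n, 4) + 1):
--         if _PREF_REQ.get(numero[:k]) == n:
--             return True, numero
--     return False, None
-- ===== Notes on version B (the rewrite author's own statement) =====
-- stated objective: alternative
-- what changed: Instead of branching on length and scanning each prefix tuple with startswith, B strips separator characters in one filtering pass and walks the number's own prefixes (k = 1..4), looking each up in a single flat prefix-to-required-length table and accepting when the required length equals the number's length.
import Mathlib
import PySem

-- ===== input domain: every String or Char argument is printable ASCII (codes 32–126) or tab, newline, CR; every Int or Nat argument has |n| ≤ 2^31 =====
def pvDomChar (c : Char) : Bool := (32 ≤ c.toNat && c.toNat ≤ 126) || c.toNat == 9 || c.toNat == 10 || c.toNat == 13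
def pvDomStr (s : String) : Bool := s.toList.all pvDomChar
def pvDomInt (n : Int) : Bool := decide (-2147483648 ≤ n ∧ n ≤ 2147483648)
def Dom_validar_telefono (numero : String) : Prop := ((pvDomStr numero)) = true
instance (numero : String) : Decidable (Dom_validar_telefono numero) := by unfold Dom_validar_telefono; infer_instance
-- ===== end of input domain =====

-- B strips ' '/'-' in one filtering pass and scans the number's own prefixes (k = 1..4)
-- against a single flat prefix → required-length table, instead of A's length branches
-- with linear startswith scans over the two prefix tuples (alternative decomposition).

-- ===== PORT A =====
def pvPrefijosCelulares : List String :=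
  ["093", "094", "095", "091", "092", "098", "099", "096", "097"]

def pvPrefijosFijos : List String :=
  ["2", "463", "436", "444", "435", "4364", "4385", "434", "452", "453",
   "4567", "4560", "456", "472", "473", "477", "462", "464", "445", "447", "442", "433"]

-- 'for prefijo in …: if numero.startswith(prefijo): return True, numero';
-- falling off the loop reaches the final 'return False, None'
def pvLoopA (n : String) : List String → Bool × Option String
  | [] => (false, none)
  | p :: ps => if PySem.Str.startswith n p then (true, some n) else pvLoopA n ps

def validar_telefono (numero : String) : Bool × Option String :=
  let n := PySem.Str.replace (PySem.Str.replace numero " " "") "-" ""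
  if PySem.Str.len n = 9 then pvLoopA n pvPrefijosCelulares
  else if PySem.Str.len n = 8 then pvLoopA n pvPrefijosFijos
  else (false, none)

-- ===== PORT B =====
-- the module-level _PREF_REQ table: prefix -> required total length
def pvPrefReqList : List (String × Int) :=
  [("093", 9), ("094", 9), ("095", 9),
   ("091", 9), ("092", 9), ("098", 9), ("099", 9),
   ("096", 9), ("097", 9),
   ("2", 8), ("463", 8), ("436", 8), ("444", 8), ("435", 8),
   ("4364", 8), ("4385", 8), ("434", 8), ("452", 8), ("453", 8),
   ("4567", 8), ("4560", 8), ("456", 8), ("472", 8), ("473", 8),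
   ("477", 8), ("462", 8), ("464", 8), ("445", 8), ("447", 8),
   ("442", 8), ("433", 8)]

def pvPrefReq : PySem.Dict String Int := PySem.Dict.ofList pvPrefReqList

-- 'for k in range(1, min(n, 4) + 1): if _PREF_REQ.get(numero[:k]) == n: return True, numero'
def pvLoopB (s : String) (n : Int) : List Int → Bool × Option String
  | [] => (false, none)
  | k :: ks =>
      if PySem.Dict.get? pvPrefReq (PySem.Str.slice s none (some k)) == some n then (true, some s)
      else pvLoopB s n ks

def validar_telefono_alt (numero : String) : Bool × Option String :=
  -- ''.join(c for c in numero if c not in ' -')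
  let s := String.ofList (numero.toList.filter (fun ch => !(ch == ' ' || ch == '-')))
  let n := PySem.Str.len s
  pvLoopB s n (PySem.List.pyRange 1 (min n 4 + 1) 1)

-- ===== PRECONDITION & SPEC =====
def Spec_validar_telefono (numero : String) (out : Bool × Option String) : Prop := out = validar_telefono_alt numero
instance (numero : String) (out : Bool × Option String) : Decidable (Spec_validar_telefono numero out) := by unfold Spec_validar_telefono; infer_instance

-- ===== CLAIM (what is proved, stated in full; the proofs are below) =====
def Claim_equal_validar_telefono : Prop := ∀ (numero : String), Dom_validar_telefono numero → Spec_validar_telefono numero (validar_telefono numero)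

-- ===== LEMMAS AND PROOFS =====

-- A's normalization (two replaces) equals B's single filtering pass
theorem go_filter (c : Char) (fuel : Nat) (l acc : List Char) (h : l.length ≤ fuel) :
    PySem.Chars.replace.go [c] [] fuel l acc
      = acc.reverse ++ l.filter (fun x => !(x == c)) := by
  induction fuel generalizing l acc with
  | zero =>
    have : l = [] := List.length_eq_zero_iff.mp (Nat.le_zero.mp h)
    subst this
    simp [PySem.Chars.replace.go]
  | succ f ih =>
    cases l with
    | nil => simp [PySem.Chars.replace.go]
    | cons x t =>
      rw [PySem.Chars.replace.go]
      by_cases hx : x = c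
      · subst hx
        rw [if_pos (by simp [List.isPrefixOf])]
        rw [ih _ _ (by simpa using Nat.le_of_succ_le_succ h)]
        simp
      · rw [if_neg (by simp [List.isPrefixOf, Ne.symm hx])]
        rw [ih _ _ (by simpa using Nat.le_of_succ_le_succ h)]
        simp [hx]

theorem replace_filter (s : List Char) (c : Char) :
    PySem.Chars.replace s [c] [] = s.filter (fun x => !(x == c)) := by
  rw [PySem.Chars.replace, if_neg (by simp)]
  simpa using go_filter c s.length s [] le_rfl

theorem norm_eq (numero : String) :
    PySem.Str.replace (PySem.Str.replace numero " " "") "-" ""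
      = String.ofList (numero.toList.filter (fun ch => !(ch == ' ' || ch == '-'))) := by
  rw [String.ext_iff]
  rw [PySem.Str.toList_replace, PySem.Str.toList_replace]
  show PySem.Chars.replace (PySem.Chars.replace numero.toList [' '] []) ['-'] [] = _
  rw [replace_filter, replace_filter, List.filter_filter]
  rw [show (String.ofList (List.filter (fun ch => !(ch == ' ' || ch == '-')) numero.toList)).toList
        = List.filter (fun ch => !(ch == ' ' || ch == '-')) numero.toList from String.toList_ofList]
  apply List.filter_congr
  intro x _
  cases hc1 : x == ' ' <;> cases hc2 : x == '-' <;> simp_all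

-- loop shapes
theorem loopA_eq_any (n : String) (ps : List String) :
    pvLoopA n ps = if ps.any (fun p => PySem.Str.startswith n p) then (true, some n) else (false, none) := by
  induction ps with
  | nil => rfl
  | cons p ps ih =>
    rw [pvLoopA, ih, List.any_cons]
    cases h : PySem.Str.startswith n p <;> simp

theorem loopB_eq_any (s : String) (n : Int) (ks : List Int) :
    pvLoopB s n ks =
      if ks.any (fun k => PySem.Dict.get? pvPrefReq (PySem.Str.slice s none (some k)) == some n)
      then (true, some s) else (false, none) := by
  induction ks with
  | nil => rfl
  | cons k ks ih =>
    rw [pvLoopB, ih, List.any_cons]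
    cases h : PySem.Dict.get? pvPrefReq (PySem.Str.slice s none (some k)) == some n <;> simp

-- slices and startswith
theorem slice_take (s : String) (k : Nat) :
    (PySem.Str.slice s none (some (k : Int))).toList = s.toList.take k := by
  simp [PySem.Str.toList_slice, PySem.List.slice_to]

theorem startswith_eq_slice (n p : String) (L : Nat) (hp : p.toList.length = L) :
    PySem.Str.startswith n p = (PySem.Str.slice n none (some (L : Int)) == p) := by
  have hs : (PySem.Str.slice n none (some (L : Int))).toList = n.toList.take L := slice_take n L
  rw [Bool.eq_iff_iff, beq_iff_eq, String.ext_iff, hs]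
  rw [show PySem.Str.startswith n p = PySem.Chars.startswith n.toList p.toList from by simp]
  rw [PySem.Chars.startswith_iff, List.prefix_iff_eq_take, hp]
  exact eq_comm

-- the table, characterized
theorem pvPrefReq_items : pvPrefReq.items = pvPrefReqList := by decide

theorem val_mem (t : String) (v : Int) (h : PySem.Dict.get? pvPrefReq t = some v) :
    (t, v) ∈ pvPrefReqList := by
  rw [PySem.Dict.get?, pvPrefReq_items] at h
  obtain ⟨pair, hf, h2⟩ := Option.map_eq_some_iff.mp h
  have hm := List.mem_of_find?_eq_some hf
  have hp := List.find?_some hf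
  simp only [beq_iff_eq] at hp
  obtain ⟨a, b⟩ := pair
  simp_all

theorem get9_iff (t : String) :
    PySem.Dict.get? pvPrefReq t = some 9 ↔ t ∈ pvPrefijosCelulares := by
  constructor
  · intro h
    have hm := val_mem t 9 h
    simp only [pvPrefReqList, List.mem_cons, List.not_mem_nil, or_false, Prod.mk.injEq] at hm
    simp only [pvPrefijosCelulares, List.mem_cons, List.not_mem_nil, or_false]
    rcases hm with ⟨h1,_⟩|⟨h1,_⟩|⟨h1,_⟩|⟨h1,_⟩|⟨h1,_⟩|⟨h1,_⟩|⟨h1,_⟩|⟨h1,_⟩|⟨h1,_⟩|hm <;> try (subst h1; simp)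
    rcases hm with ⟨_,h2⟩|⟨_,h2⟩|⟨_,h2⟩|⟨_,h2⟩|⟨_,h2⟩|⟨_,h2⟩|⟨_,h2⟩|⟨_,h2⟩|⟨_,h2⟩|⟨_,h2⟩|⟨_,h2⟩|
      ⟨_,h2⟩|⟨_,h2⟩|⟨_,h2⟩|⟨_,h2⟩|⟨_,h2⟩|⟨_,h2⟩|⟨_,h2⟩|⟨_,h2⟩|⟨_,h2⟩|⟨_,h2⟩|⟨_,h2⟩ <;> exact absurd h2 (by decide)
  · intro h
    simp only [pvPrefijosCelulares, List.mem_cons, List.not_mem_nil, or_false] at h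
    rcases h with h|h|h|h|h|h|h|h|h <;> subst h <;> decide

theorem get8_iff (t : String) :
    PySem.Dict.get? pvPrefReq t = some 8 ↔ t ∈ pvPrefijosFijos := by
  constructor
  · intro h
    have hm := val_mem t 8 h
    simp only [pvPrefReqList, List.mem_cons, List.not_mem_nil, or_false, Prod.mk.injEq] at hm
    simp only [pvPrefijosFijos, List.mem_cons, List.not_mem_nil, or_false]
    rcases hm with ⟨_,h2⟩|⟨_,h2⟩|⟨_,h2⟩|⟨_,h2⟩|⟨_,h2⟩|⟨_,h2⟩|⟨_,h2⟩|⟨_,h2⟩|⟨_,h2⟩|hm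
    · exact absurd h2 (by decide)
    · exact absurd h2 (by decide)
    · exact absurd h2 (by decide)
    · exact absurd h2 (by decide)
    · exact absurd h2 (by decide)
    · exact absurd h2 (by decide)
    · exact absurd h2 (by decide)
    · exact absurd h2 (by decide)
    · exact absurd h2 (by decide)
    rcases hm with ⟨h1,_⟩|⟨h1,_⟩|⟨h1,_⟩|⟨h1,_⟩|⟨h1,_⟩|⟨h1,_⟩|⟨h1,_⟩|⟨h1,_⟩|⟨h1,_⟩|⟨h1,_⟩|⟨h1,_⟩|
      ⟨h1,_⟩|⟨h1,_⟩|⟨h1,_⟩|⟨h1,_⟩|⟨h1,_⟩|⟨h1,_⟩|⟨h1,_⟩|⟨h1,_⟩|⟨h1,_⟩|⟨h1,_⟩|⟨h1,_⟩ <;> subst h1 <;> simp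
  · intro h
    simp only [pvPrefijosFijos, List.mem_cons, List.not_mem_nil, or_false] at h
    rcases h with h|h|h|h|h|h|h|h|h|h|h|h|h|h|h|h|h|h|h|h|h|h <;> subst h <;> decide

theorem get_vals (t : String) (v : Int) (h : PySem.Dict.get? pvPrefReq t = some v) :
    v = 8 ∨ v = 9 := by
  have hm := val_mem t v h
  simp only [pvPrefReqList, List.mem_cons, List.not_mem_nil, or_false, Prod.mk.injEq] at hm
  rcases hm with ⟨_,h2⟩|⟨_,h2⟩|⟨_,h2⟩|⟨_,h2⟩|⟨_,h2⟩|⟨_,h2⟩|⟨_,h2⟩|⟨_,h2⟩|⟨_,h2⟩|⟨_,h2⟩|⟨_,h2⟩|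
    ⟨_,h2⟩|⟨_,h2⟩|⟨_,h2⟩|⟨_,h2⟩|⟨_,h2⟩|⟨_,h2⟩|⟨_,h2⟩|⟨_,h2⟩|⟨_,h2⟩|⟨_,h2⟩|⟨_,h2⟩|⟨_,h2⟩|⟨_,h2⟩|
    ⟨_,h2⟩|⟨_,h2⟩|⟨_,h2⟩|⟨_,h2⟩|⟨_,h2⟩|⟨_,h2⟩|⟨_,h2⟩ <;> subst h2 <;> simp

-- the core: for a number of length N ∈ {8,9}, scanning k = 1..4 against the table
-- equals scanning the corresponding prefix list with startswith
theorem anyB_iff (s : String) (N : Nat) (hN : s.toList.length = N) (h4 : 4 ≤ N)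
    (m : Int) (P : List String)
    (hchar : ∀ t : String, PySem.Dict.get? pvPrefReq t = some m ↔ t ∈ P)
    (hlen : ∀ p ∈ P, p.toList.length = 1 ∨ p.toList.length = 3 ∨ p.toList.length = 4) :
    ([1, 2, 3, 4].any
        (fun k : Int => PySem.Dict.get? pvPrefReq (PySem.Str.slice s none (some k)) == some m))
      = P.any (fun p => PySem.Str.startswith s p) := by
  rw [Bool.eq_iff_iff]
  simp only [List.any_eq_true]
  constructor
  · rintro ⟨k, hk, hc⟩
    rw [beq_iff_eq] at hc
    have hkn : ∃ kn : Nat, k = (kn : Int) ∧ 1 ≤ kn ∧ kn ≤ 4 := by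
      simp only [List.mem_cons, List.not_mem_nil, or_false] at hk
      rcases hk with h|h|h|h <;> subst h
      · exact ⟨1, by norm_num⟩
      · exact ⟨2, by norm_num⟩
      · exact ⟨3, by norm_num⟩
      · exact ⟨4, by norm_num⟩
    obtain ⟨kn, rfl, hk1, hk4⟩ := hkn
    set p := PySem.Str.slice s none (some (kn : Int)) with hpdef
    have hmem : p ∈ P := (hchar p).mp hc
    have hplen : p.toList.length = kn := by
      rw [hpdef, slice_take, List.length_take, hN]
      omega
    refine ⟨p, hmem, ?_⟩
    rw [startswith_eq_slice s p kn hplen, beq_iff_eq, hpdef]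
  · rintro ⟨p, hmem, hsw⟩
    set L := p.toList.length with hL
    rw [startswith_eq_slice s p L rfl, beq_iff_eq] at hsw
    have hc : PySem.Dict.get? pvPrefReq (PySem.Str.slice s none (some (L : Int))) = some m := by
      rw [hsw]; exact (hchar p).mpr hmem
    refine ⟨(L : Int), ?_, by rw [beq_iff_eq]; exact hc⟩
    rcases hlen p hmem with h|h|h <;> rw [← hL] at * <;> rw [h] <;> simp

-- ===== VERDICT (by name: the statement is the Claim_ definition above) =====
theorem validar_telefono_spec : Claim_equal_validar_telefono := by
  intro numero _
  unfold Spec_validar_telefono validar_telefono validar_telefono_alt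
  rw [norm_eq]
  set s := String.ofList (numero.toList.filter (fun ch => !(ch == ' ' || ch == '-'))) with hs
  clear_value s
  by_cases h9 : PySem.Str.len s = 9
  · have hlen : s.toList.length = 9 := by
      have := h9; rw [PySem.Str.len_eq] at this; exact_mod_cast this
    rw [if_pos h9]
    show pvLoopA s pvPrefijosCelulares
      = pvLoopB s (PySem.Str.len s) (PySem.List.pyRange 1 (min (PySem.Str.len s) 4 + 1) 1)
    rw [h9]
    rw [show PySem.List.pyRange 1 (min (9 : Int) 4 + 1) 1 = [1, 2, 3, 4] from by decide]
    rw [loopA_eq_any, loopB_eq_any]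
    rw [anyB_iff s 9 hlen (by norm_num) 9 pvPrefijosCelulares get9_iff (by decide)]
  · by_cases h8 : PySem.Str.len s = 8
    · have hlen : s.toList.length = 8 := by
        have := h8; rw [PySem.Str.len_eq] at this; exact_mod_cast this
      rw [if_neg h9, if_pos h8]
      show pvLoopA s pvPrefijosFijos
        = pvLoopB s (PySem.Str.len s) (PySem.List.pyRange 1 (min (PySem.Str.len s) 4 + 1) 1)
      rw [h8]
      rw [show PySem.List.pyRange 1 (min (8 : Int) 4 + 1) 1 = [1, 2, 3, 4] from by decide]
      rw [loopA_eq_any, loopB_eq_any]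
      rw [anyB_iff s 8 hlen (by norm_num) 8 pvPrefijosFijos get8_iff (by decide)]
    · rw [if_neg h9, if_neg h8]
      show (false, none)
        = pvLoopB s (PySem.Str.len s) (PySem.List.pyRange 1 (min (PySem.Str.len s) 4 + 1) 1)
      rw [loopB_eq_any]
      rw [if_neg ?_]
      intro hany
      rw [List.any_eq_true] at hany
      obtain ⟨k, _, hc⟩ := hany
      rw [beq_iff_eq] at hc
      rcases get_vals _ _ hc with h|h <;> [exact h8 (h ▸ rfl); exact h9 (h ▸ rfl)]
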